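-- pv_equiv track=rewrite | github.com/NLPatVCU/SMM4H | preprocessing.py | replace_hashtags
-- ===== SOURCE A (Python) =====
-- def replace_hashtags(tweets):
--     tweets_no_hashtag = []
--     for tweet in tweets:
--         tweet_no_hashtag = ""
--         for index, char in enumerate(tweet):
--             if index < len(tweet) - 1:
--                 if char == "#" and tweet[index+1].isalpha():
--                     tweet_no_hashtag += " hashtag "
--                 else:
--                     tweet_no_hashtag += char
--             else:
--                 tweet_no_hashtag += char
--         tweet_correct_spacing = tweet_no_hashtag.replace('  ', ' ')
--         tweets_no_hashtag.append(tweet_correct_spacing)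
--     return tweets_no_hashtag
-- ===== SOURCE B (Python) =====
-- import re
--
-- def replace_hashtags(tweets):
--     # Single regex pass: a '#' whose (non-consumed) next char is alphabetic
--     # becomes ' hashtag '; then collapse double spaces once, as A does.
--     sub = re.compile(r'#(?=(.))', re.DOTALL)
--     return [
--         sub.sub(lambda m: ' hashtag ' if m.group(1).isalpha() else '#', tweet)
--            .replace('  ', ' ')
--         for tweet in tweets
--     ]
-- ===== Notes on version B (the rewrite author's own statement) =====
-- stated objective: idiomatic
-- what changed: Replaces A's index-by-index scan with accumulator and lookahead-by-index by a single compiled regex substitution ('#' followed by a non-consumed char, callback decides via isalpha) inside a list comprehension.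
import Mathlib
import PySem

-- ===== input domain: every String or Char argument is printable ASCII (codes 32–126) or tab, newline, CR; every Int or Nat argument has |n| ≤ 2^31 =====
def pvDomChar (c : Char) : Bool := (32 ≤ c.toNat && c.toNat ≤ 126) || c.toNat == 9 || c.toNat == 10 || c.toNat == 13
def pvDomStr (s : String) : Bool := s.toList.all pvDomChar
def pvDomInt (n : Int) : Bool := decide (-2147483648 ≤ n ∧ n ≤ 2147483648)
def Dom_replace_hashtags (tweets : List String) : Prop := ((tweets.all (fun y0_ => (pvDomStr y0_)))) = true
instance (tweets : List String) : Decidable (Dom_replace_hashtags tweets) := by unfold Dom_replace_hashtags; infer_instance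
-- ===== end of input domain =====

-- B replaces A's indexed character loop by a single regex substitution pass; objective: idiomatic.

-- ===== PORT A =====
-- A's inner loop body: indexed scan over the tweet, appending to a string accumulator.
def aStep (cs : List Char) (s : List Char) (p : Int × Char) : List Char :=
  if p.1 < (cs.length : Int) - 1 then
    if p.2 == '#' && ((PySem.List.pyGet? cs (p.1 + 1)).elim false PySem.Chars.isalpha) then
      s ++ " hashtag ".toList
    else
      s ++ [p.2]
  else
    s ++ [p.2]

def replace_hashtags (tweets : List String) : List String :=
  tweets.foldl (fun acc tweet =>
    let cs := tweet.toList
    let body := (PySem.List.enumerate cs 0).foldl (aStep cs) []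
    acc ++ [String.mk (PySem.Chars.replace body "  ".toList " ".toList)]) []

-- ===== PORT B =====
-- Port of Source B's regex r'#(?=(.))' substitution: scan left to right; at a '#'
-- with a following char the callback emits ' hashtag ' if that char is alphabetic,
-- else '#'; the lookahead does not consume the following char.
def bSub : List Char → List Char
  | [] => []
  | [c] => [c]
  | c1 :: c2 :: rest =>
    if c1 == '#' then
      (if PySem.Chars.isalpha c2 then " hashtag ".toList else ['#']) ++ bSub (c2 :: rest)
    else
      c1 :: bSub (c2 :: rest)

def replace_hashtags_alt (tweets : List String) : List String :=
  tweets.map (fun tweet =>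
    String.mk (PySem.Chars.replace (bSub tweet.toList) "  ".toList " ".toList))

-- ===== PRECONDITION & SPEC =====
def Spec_replace_hashtags (tweets : List String) (out : List String) : Prop := out = replace_hashtags_alt tweets
instance (tweets : List String) (out : List String) : Decidable (Spec_replace_hashtags tweets out) := by unfold Spec_replace_hashtags; infer_instance

-- ===== CLAIM (what is proved, stated in full; the proofs are below) =====
def Claim_equal_replace_hashtags : Prop := ∀ (tweets : List String), Dom_replace_hashtags tweets → Spec_replace_hashtags tweets (replace_hashtags tweets)

-- ===== LEMMAS AND PROOFS =====

-- A's indexed scan over a suffix equals bSub of that suffix.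
lemma inner_eq (suf : List Char) : ∀ (pre acc : List Char),
    (PySem.List.enumerate suf (pre.length : Int)).foldl (aStep (pre ++ suf)) acc
      = acc ++ bSub suf := by
  induction suf with
  | nil => intro pre acc; simp [PySem.List.enumerate, bSub]
  | cons c suf' ih =>
    intro pre acc
    rw [PySem.List.enumerate_cons]
    cases suf' with
    | nil =>
      simp only [List.foldl_cons, PySem.List.enumerate_nil, List.foldl_nil, aStep, bSub]
      have h : ¬ ((pre.length : Int) < ((pre ++ [c]).length : Int) - 1) := by
        have hl : ((pre ++ [c]).length : Int) = (pre.length : Int) + 1 := by simp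
        omega
      rw [if_neg h]
    | cons c2 rest =>
      simp only [List.foldl_cons]
      have hstep : aStep (pre ++ c :: c2 :: rest) acc ((pre.length : Int), c)
          = acc ++ (if c == '#' then (if PySem.Chars.isalpha c2 then " hashtag ".toList else ['#']) else [c]) := by
        have hlt : (pre.length : Int) < ((pre ++ c :: c2 :: rest).length : Int) - 1 := by
          simp; omega
        have hget : PySem.List.pyGet? (pre ++ c :: c2 :: rest) ((pre.length : Int) + 1) = some c2 := by
          have : ((pre.length : Int) + 1) = ((pre.length + 1 : Nat) : Int) := by push_cast; ring
          rw [this, PySem.List.pyGet?_natCast]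
          simp []
        rw [aStep, if_pos hlt, hget]
        by_cases hc : c = '#'
        · subst hc
          by_cases ha : PySem.Chars.isalpha c2
          · simp [ha]
          · simp [ha]
        · have : (c == '#') = false := by simp [hc]
          simp [this]
      rw [hstep]
      have hpre : ((pre ++ [c]).length : Int) = ((pre.length : Int) + 1) := by simp
      have := ih (pre ++ [c])
        (acc ++ (if c == '#' then (if PySem.Chars.isalpha c2 then " hashtag ".toList else ['#']) else [c]))
      rw [hpre, List.append_assoc, List.singleton_append] at this
      rw [this]
      by_cases hc : c = '#'
      · subst hc; simp [bSub]
      · have hb : (c == '#') = false := by simp [hc]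
        simp [bSub, hb]

lemma inner_eq0 (cs : List Char) :
    (PySem.List.enumerate cs 0).foldl (aStep cs) [] = bSub cs := by
  have := inner_eq cs [] []
  simpa using this

-- ===== VERDICT (by name: the statement is the Claim_ definition above) =====
theorem replace_hashtags_spec : Claim_equal_replace_hashtags := by
  intro tweets _
  unfold Spec_replace_hashtags replace_hashtags replace_hashtags_alt
  suffices h : ∀ (ts : List String) (acc : List String),
      ts.foldl (fun acc tweet =>
        let cs := tweet.toList
        let body := (PySem.List.enumerate cs 0).foldl (aStep cs) []
        acc ++ [String.mk (PySem.Chars.replace body "  ".toList " ".toList)]) acc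
      = acc ++ ts.map (fun tweet =>
          String.mk (PySem.Chars.replace (bSub tweet.toList) "  ".toList " ".toList)) by
    simpa using h tweets []
  intro ts
  induction ts with
  | nil => intro acc; simp
  | cons t ts ih =>
    intro acc
    simp only [List.foldl_cons, List.map_cons]
    rw [ih]
    simp [inner_eq0]
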